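-- pv_equiv track=rewrite | github.com/zetang94/RagCodeEval | data_collector/utils.py | avg_split_list
-- ===== SOURCE A (Python) =====
-- def avg_split_list(arr, split_num):
--     """
--     :param arr: Integer list, and each element > 0
--     :param split_num: The number of sub lists needs to be split.
--     :return: [partition indexes], which can make the (split_num + 1) sub lists that have the close sum value.
--     """
--     n = len(arr)
--     sub_list_num = split_num + 1
--     prefix_sum = [0] * (n + 1)
--     for i in range(1, n + 1):
--         prefix_sum[i] = prefix_sum[i - 1] + arr[i - 1]
--
--     # dp[i][j] represents the minimum possible maximum subarray sum for the first i numbers using j partitions.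
--     dp = [[float('inf')] * sub_list_num for _ in range(n + 1)]
--     partition = [[-1] * sub_list_num for _ in range(n + 1)]
--     dp[0][0] = 0
--
--     for i in range(1, n + 1):
--         for j in range(1, min(sub_list_num, i + 1)):  # Now allowing up to 5 partitions, i.e., 6 segments
--             for k in range(i):
--                 current_sum = prefix_sum[i] - prefix_sum[k]
--                 max_sum = max(dp[k][j - 1], current_sum)
--                 if dp[i][j] > max_sum:
--                     dp[i][j] = max_sum
--                     partition[i][j] = k
--
--     # Backtracking to find the partition points
--     cuts = []
--     j = split_num  # Starting from partition into 5 segments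
--     i = n
--     while j > 0:
--         i = partition[i][j]
--         if i > 0:  # To avoid appending 0, which is not a valid cut
--             cuts.append(i)
--         j -= 1
--
--     cuts = sorted(cuts)
--     return cuts
-- ===== SOURCE B (Python) =====
-- def avg_split_list(arr, split_num):
--     n = len(arr)
--     m = split_num if split_num < n else n   # at most n non-empty segments
--     if m <= 0:
--         return []
--     prefix = [0]
--     for x in arr:
--         prefix.append(prefix[-1] + x)
--     memo = {}
--
--     def solve(i, j):
--         # best way to split the first i elements into j segments:
--         # (minimum possible maximum segment sum, list of cut indices, ascending),
--         # keeping the first optimum found (A's tie-break: first k improving strictly).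
--         if j == 1:
--             s = prefix[i]
--             return (s if s > 0 else 0, [])
--         key = (i, j)
--         if key in memo:
--             return memo[key]
--         best = None
--         for k in range(j - 1, i):
--             r = solve(k, j - 1)
--             s = prefix[i] - prefix[k]
--             cand = r[0] if r[0] > s else s
--             if best is None or cand < best[0]:
--                 best = (cand, r[1] + [k])
--         memo[key] = best
--         return best
--
--     return solve(n, m)[1]
-- ===== Notes on version B (the rewrite author's own statement) =====
-- stated objective: alternative
-- what changed: B replaces A's bottom-up 2-D dp/partition tables with inf sentinels, the full k-scan from 0, the index-backtracking pass and the final sort by a top-down memoized recursion solve(i, j) that scans only the feasible k range [j-1, i), caps the segment count at len(arr), and returns (best value, ascending cut list) directly, so there is no partition table, no backtracking pass and no sort.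
import Mathlib
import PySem

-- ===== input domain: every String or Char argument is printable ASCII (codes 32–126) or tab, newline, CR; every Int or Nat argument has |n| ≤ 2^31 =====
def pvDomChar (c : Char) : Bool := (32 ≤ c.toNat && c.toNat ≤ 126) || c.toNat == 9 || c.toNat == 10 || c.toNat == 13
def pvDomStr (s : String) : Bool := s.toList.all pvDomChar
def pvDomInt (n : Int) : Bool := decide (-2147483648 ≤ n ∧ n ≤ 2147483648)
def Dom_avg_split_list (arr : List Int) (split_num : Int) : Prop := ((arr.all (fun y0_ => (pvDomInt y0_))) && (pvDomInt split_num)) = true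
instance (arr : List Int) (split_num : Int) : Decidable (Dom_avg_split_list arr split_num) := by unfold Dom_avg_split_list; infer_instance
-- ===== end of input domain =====

-- B replaces A's bottom-up 2-D dp/partition tables, backtracking pass and final sort by a
-- top-down memoized recursion that returns the cut list directly (alternative decomposition).

-- ===== PORT A =====
-- max(dp_cell, cur) where `none` plays float('inf')
def pvInfMax (o : Option Int) (c : Int) : Option Int :=
  match o with
  | none => none
  | some v => some (max v c)

-- Python '>' between two inf-or-int values (`none` = float('inf'))
def pvInfGt (a b : Option Int) : Bool :=
  match a, b with
  | none, none => false
  | none, some _ => true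
  | some _, none => false
  | some x, some y => decide (x > y)

-- t[i][j] (Python chained indexing; pyGetD follows Python's negative-index rule; in range wherever A runs under Pre_)
def pvGet2 {α : Type} (t : List (List α)) (i j : Int) (d : α) : α :=
  PySem.List.pyGetD (PySem.List.pyGetD t i []) j d

-- t[i][j] = v
def pvSet2 {α : Type} (t : List (List α)) (i j : Int) (v : α) : List (List α) :=
  PySem.List.pySetD t i (PySem.List.pySetD (PySem.List.pyGetD t i []) j v)

def avg_split_list (arr : List Int) (split_num : Int) : List Int :=
  let n : Int := arr.length
  let sub_list_num : Int := split_num + 1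
  let prefix_sum : List Int :=
    (PySem.List.pyRange 1 (n + 1) 1).foldl
      (fun ps i =>
        PySem.List.pySetD ps i
          (PySem.List.pyGetD ps (i - 1) 0 + PySem.List.pyGetD arr (i - 1) 0))
      (List.replicate (n + 1).toNat 0)
  let dp0 : List (List (Option Int)) :=
    List.replicate (n + 1).toNat (List.replicate sub_list_num.toNat none)
  let pt0 : List (List Int) :=
    List.replicate (n + 1).toNat (List.replicate sub_list_num.toNat (-1))
  let dp1 := pvSet2 dp0 0 0 (some 0)   -- dp[0][0] = 0 (Python raises IndexError when sub_list_num ≤ 0: outside Pre_)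
  let st :=
    (PySem.List.pyRange 1 (n + 1) 1).foldl
      (fun (st : List (List (Option Int)) × List (List Int)) i =>
        (PySem.List.pyRange 1 (min sub_list_num (i + 1)) 1).foldl
          (fun st j =>
            (PySem.List.pyRange 0 i 1).foldl
              (fun (st : List (List (Option Int)) × List (List Int)) k =>
                let current_sum :=
                  PySem.List.pyGetD prefix_sum i 0 - PySem.List.pyGetD prefix_sum k 0
                let max_sum := pvInfMax (pvGet2 st.1 k (j - 1) none) current_sum
                if pvInfGt (pvGet2 st.1 i j none) max_sum then
                  (pvSet2 st.1 i j max_sum, pvSet2 st.2 i j k)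
                else st)
              st)
          st)
      (dp1, pt0)
  -- while j > 0: j = split_num, split_num-1, …, 1
  let bt :=
    (PySem.List.pyRange split_num 0 (-1)).foldl
      (fun (bs : Int × List Int) j =>
        let i2 := pvGet2 st.2 bs.1 j (-1)
        (i2, if i2 > 0 then bs.2 ++ [i2] else bs.2))
      (n, ([] : List Int))
  PySem.List.sorted bt.2 (fun x => x) false

-- ===== PORT B =====
-- B's memo dict: (i, j) ↦ (best max-segment sum, ascending cut list)
abbrev pvMemo := PySem.Dict (Int × Int) (Int × List Int)

-- B's nested `solve(i, j)`; the fuel argument t stands for j - 1, so `0` is Python's `j == 1`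
-- base case and `t+1` is Python's recursive case for j = t+2.  The memo is threaded through.
-- the body of B's `for k in range(j-1, i)` loop (solve = the recursive call at j-1)
def pvStepB (pref : List Int) (solve : Int → pvMemo → ((Int × List Int) × pvMemo)) (i : Int)
    (st : Option (Int × List Int) × pvMemo) (k : Int) : Option (Int × List Int) × pvMemo :=
  let rm := solve k st.2
  let s := PySem.List.pyGetD pref i 0 - PySem.List.pyGetD pref k 0
  let cand := if rm.1.1 > s then rm.1.1 else s
  match st.1 with
  | none => (some (cand, rm.1.2 ++ [k]), rm.2)
  | some b => (if cand < b.1 then some (cand, rm.1.2 ++ [k]) else st.1, rm.2)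

def pvSolveB (pref : List Int) : ℕ → Int → pvMemo → ((Int × List Int) × pvMemo)
  | 0, i, memo =>
      let s := PySem.List.pyGetD pref i 0
      ((if s > 0 then s else 0, []), memo)
  | (t+1), i, memo =>
      match PySem.Dict.get? memo (i, (t : Int) + 2) with
      | some r => (r, memo)
      | none =>
        let st :=
          (PySem.List.pyRange ((t : Int) + 1) i 1).foldl
            (pvStepB pref (pvSolveB pref t) i) (none, memo)
        let best := st.1.getD (0, [])  -- Python's `best` is never None here: every call has i ≥ j
        (best, PySem.Dict.insert st.2 (i, (t : Int) + 2) best)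

def avg_split_list_alt (arr : List Int) (split_num : Int) : List Int :=
  let n : Int := arr.length
  let m : Int := if split_num < n then split_num else n   -- at most n non-empty segments
  if m ≤ 0 then []
  else
    let pref : List Int :=
      arr.foldl (fun ps x => ps ++ [PySem.List.pyGetD ps (-1) 0 + x]) [0]
    (pvSolveB pref (m.toNat - 1) n PySem.Dict.empty).1.2

-- ===== PRECONDITION & SPEC =====
-- A raises IndexError for split_num < 0 (dp[0][0] = 0 on rows that are empty lists); Pre_ excludes exactly those inputs.
def Pre_avg_split_list (arr : List Int) (split_num : Int) : Prop := 0 ≤ split_num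
instance (arr : List Int) (split_num : Int) : Decidable (Pre_avg_split_list arr split_num) := by
  unfold Pre_avg_split_list; infer_instance

def pvWitness_avg_split_list : List Int × Int := ([3, 1, 2, 4], 2)


def Spec_avg_split_list (arr : List Int) (split_num : Int) (out : List Int) : Prop :=
  out = avg_split_list_alt arr split_num
instance (arr : List Int) (split_num : Int) (out : List Int) : Decidable (Spec_avg_split_list arr split_num out) := by
  unfold Spec_avg_split_list; infer_instance

-- ===== CLAIM (what is proved, stated in full; the proofs are below) =====
def Claim_equal_avg_split_list : Prop := ∀ (arr : List Int) (split_num : Int), Dom_avg_split_list arr split_num → Pre_avg_split_list arr split_num → Spec_avg_split_list arr split_num (avg_split_list arr split_num)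


-- ===== LEMMAS AND PROOFS =====

def pvScan (g : ℕ → Int) (ks : List ℕ) (b : Option (Int × ℕ)) : Option (Int × ℕ) :=
  ks.foldl
    (fun b k =>
      match b with
      | none => some (g k, k)
      | some (bv, _) => if g k < bv then some (g k, k) else b) b
def pvFM (g : ℕ → Int) (ks : List ℕ) : Option (Int × ℕ) := pvScan g ks none

def pvScanA (f : ℕ → Option Int) (ks : List ℕ) (b : Option Int × Int) : Option Int × Int :=
  ks.foldl (fun b k => if pvInfGt b.1 (f k) then (f k, (k : Int)) else b) b

theorem pvScanA_none_step (f : ℕ → Option Int) (k : ℕ) (b : Option Int × Int)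
    (h : f k = none) : (if pvInfGt b.1 (f k) then (f k, (k : Int)) else b) = b := by
  rcases b with ⟨c, p⟩
  cases c <;> simp [h, pvInfGt]

theorem pvScanA_none_prefix (f : ℕ → Option Int) (ks₁ ks₂ : List ℕ) (b : Option Int × Int)
    (h : ∀ k ∈ ks₁, f k = none) :
    pvScanA f (ks₁ ++ ks₂) b = pvScanA f ks₂ b := by
  induction ks₁ generalizing b with
  | nil => simp [pvScanA]
  | cons k ks ih =>
    simp only [pvScanA, List.cons_append, List.foldl_cons]
    rw [pvScanA_none_step f k b (h k (by simp))]
    exact ih b (fun x hx => h x (by simp [hx]))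

theorem pvScanA_none_suffix (f : ℕ → Option Int) (ks₁ ks₂ : List ℕ) (b : Option Int × Int)
    (h : ∀ k ∈ ks₂, f k = none) :
    pvScanA f (ks₁ ++ ks₂) b = pvScanA f ks₁ b := by
  simp only [pvScanA, List.foldl_append]
  induction ks₂ generalizing b with
  | nil => simp
  | cons k ks ih =>
    simp only [List.foldl_cons]
    rw [pvScanA_none_step f k _ (h k (by simp))]
    exact ih _ (fun x hx => h x (by simp [hx]))

theorem pvScanA_corr (f : ℕ → Option Int) (g : ℕ → Int) (ks : List ℕ)
    (h : ∀ k ∈ ks, f k = some (g k)) (st : Option (Int × ℕ)) (p : Int) :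
    pvScanA f ks (match st with | none => (none, p) | some (v, k) => (some v, (k : Int)))
      = match pvScan g ks st with | none => (none, p) | some (v, k) => (some v, (k : Int)) := by
  induction ks generalizing st with
  | nil => simp [pvScanA, pvScan]
  | cons k ks ih =>
    have hk := h k (by simp)
    have hrest : ∀ x ∈ ks, f x = some (g x) := fun x hx => h x (by simp [hx])
    simp only [pvScanA, pvScan, List.foldl_cons] at *
    rcases st with _ | ⟨v, bk⟩
    · simpa [hk, pvInfGt] using ih hrest (some (g k, k))
    · by_cases hlt : g k < v
      · simpa [hk, pvInfGt, hlt, show v > g k from hlt] using ih hrest (some (g k, k))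
      · simpa [hk, pvInfGt, hlt, show ¬ (v > g k) from hlt] using ih hrest (some (v, bk))

theorem pvScan_some (g : ℕ → Int) (ks : List ℕ) (q : Int × ℕ) :
    ∃ r, pvScan g ks (some q) = some r ∧ (r = q ∨ (r.2 ∈ ks ∧ r.1 = g r.2)) := by
  induction ks generalizing q with
  | nil => exact ⟨q, by simp [pvScan], Or.inl rfl⟩
  | cons k ks ih =>
    simp only [pvScan, List.foldl_cons]
    by_cases hlt : g k < q.1
    · obtain ⟨r, hr, hor⟩ := ih (g k, k)
      refine ⟨r, ?_, ?_⟩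
      · simpa [pvScan, hlt] using hr
      · rcases hor with h1 | h2
        · subst h1; exact Or.inr ⟨by simp, by simp⟩
        · exact Or.inr ⟨by simp [h2.1], h2.2⟩
    · obtain ⟨r, hr, hor⟩ := ih q
      refine ⟨r, ?_, ?_⟩
      · rcases q with ⟨a, b⟩; simpa [pvScan, hlt] using hr
      · rcases hor with h1 | h2
        · exact Or.inl h1
        · exact Or.inr ⟨by simp [h2.1], h2.2⟩

theorem pvFM_cons (g : ℕ → Int) (k : ℕ) (ks : List ℕ) :
    pvFM g (k :: ks) = pvScan g ks (some (g k, k)) := by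
  simp [pvFM, pvScan]

theorem pvFM_mem (g : ℕ → Int) (k : ℕ) (ks : List ℕ) :
    ∃ r, pvFM g (k :: ks) = some r ∧ r.2 ∈ k :: ks ∧ r.1 = g r.2 := by
  rw [pvFM_cons]
  obtain ⟨r, hr, hor⟩ := pvScan_some g ks (g k, k)
  refine ⟨r, hr, ?_⟩
  rcases hor with h1 | h2
  · subst h1; exact ⟨by simp, by simp⟩
  · exact ⟨by simp [h2.1], h2.2⟩


def pvVec {α : Type} (len : ℕ) (f : ℕ → α) : List α := (List.range len).map f
def pvTbl {α : Type} (rows cols : ℕ) (F : ℕ → ℕ → α) : List (List α) :=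
  pvVec rows (fun i => pvVec cols (F i))

theorem pvVec_getD {α : Type} (len : ℕ) (f : ℕ → α) (i : ℕ) (d : α) (h : i < len) :
    PySem.List.pyGetD (pvVec len f) (i : Int) d = f i := by
  simp [pvVec, PySem.List.pyGetD_natCast, List.getD, List.getElem?_map, List.getElem?_range, h]

theorem pvVec_set {α : Type} (len : ℕ) (f : ℕ → α) (i : ℕ) (v : α) (h : i < len) :
    PySem.List.pySetD (pvVec len f) (i : Int) v = pvVec len (fun a => if a = i then v else f a) := by
  apply List.ext_getElem
  · simp [pvVec]
  · intro k h1 h2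
    simp only [PySem.List.pySetD_natCast] at *
    by_cases hk : k = i <;>
      simp_all [pvVec, List.getElem_set, List.getElem_map, List.getElem_range] <;> omega

theorem pvVec_getD_last {α : Type} (len : ℕ) (f : ℕ → α) (d : α) (h : 0 < len) :
    PySem.List.pyGetD (pvVec len f) (-1) d = f (len - 1) := by
  have hne : pvVec len f ≠ [] := by simp [pvVec]; omega
  rw [PySem.List.pyGetD_neg_one _ _ hne]
  simp [pvVec, List.getLast_eq_getElem]

theorem pvRangeNat (a b : ℕ) :
    PySem.List.pyRange (a : Int) (b : Int) 1 = (List.range' a (b - a)).map (Nat.cast) := by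
  rw [PySem.List.pyRange_one, List.range'_eq_map_range, List.map_map]
  have he : ((b : Int) - (a : Int)).toNat = b - a := by omega
  rw [he]
  apply List.map_congr_left
  intro k _
  simp

def pvS (arr : List Int) (i : ℕ) : Int := ((arr.take i).sum)


theorem pvVec_const {α : Type} (len : ℕ) (c : α) : pvVec len (fun _ => c) = List.replicate len c := by
  simp [pvVec, List.map_const']

theorem pvVec_congr {α : Type} (len : ℕ) (f g : ℕ → α) (h : ∀ i, i < len → f i = g i) :
    pvVec len f = pvVec len g := by
  simp only [pvVec]
  apply List.map_congr_left
  intro i hi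
  exact h i (by simpa using hi)

theorem pvS_zero (arr : List Int) : pvS arr 0 = 0 := by simp [pvS]

theorem pvS_succ (arr : List Int) (t : ℕ) (h : t < arr.length) :
    pvS arr (t + 1) = pvS arr t + arr[t] := by
  have := List.sum_take_succ arr t h
  simpa [pvS] using this

theorem pvS_cons (x : Int) (xs : List Int) (i : ℕ) :
    pvS (x :: xs) (i + 1) = x + pvS xs i := by
  simp [pvS]

-- ===== A's prefix_sum loop =====
theorem pvPrefA_aux (arr : List Int) (t : ℕ) (ht : t ≤ arr.length) :
    (PySem.List.pyRange 1 ((t : Int) + 1) 1).foldl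
      (fun ps i =>
        PySem.List.pySetD ps i
          (PySem.List.pyGetD ps (i - 1) 0 + PySem.List.pyGetD arr (i - 1) 0))
      (pvVec (arr.length + 1) (fun _ => 0))
    = pvVec (arr.length + 1) (fun i => if i ≤ t then pvS arr i else 0) := by
  induction t with
  | zero =>
    rw [show ((0 : ℕ) : Int) + 1 = 1 by norm_num, PySem.List.pyRange_one_eq_nil (by norm_num)]
    simp only [List.foldl_nil]
    congr 1
    funext i
    cases i <;> simp [pvS_zero]
  | succ t ih =>
    have ht' : t ≤ arr.length := by omega
    rw [show ((t : ℕ) + 1 : ℕ) = t + 1 from rfl]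
    rw [show (((t + 1 : ℕ) : Int) + 1) = ((t : Int) + 1) + 1 by push_cast; ring]
    rw [PySem.List.pyRange_one_succ_right (by omega)]
    rw [List.foldl_append, ih ht']
    simp only [List.foldl_cons, List.foldl_nil]
    have h1 : ((t : Int) + 1) - 1 = (t : Int) := by ring
    rw [h1]
    have h2 : (t : ℕ) < arr.length + 1 := by omega
    rw [pvVec_getD _ _ _ _ h2]
    have h3 : ((t : Int) + 1) = ((t + 1 : ℕ) : Int) := by push_cast; ring
    rw [h3, pvVec_set _ _ _ _ (by omega)]
    have harr : PySem.List.pyGetD arr (t : Int) 0 = arr[t]'(by omega) := by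
      rw [PySem.List.pyGetD_natCast]
      simp [List.getD, List.getElem?_eq_getElem (show t < arr.length by omega)]
    rw [harr]
    congr 1
    funext i
    by_cases hi : i = t + 1
    · subst hi
      simp [show t ≤ t from le_refl t, pvS_succ arr t (by omega)]
    · by_cases hle : i ≤ t <;> simp [hi, hle, show (i ≤ t + 1) ↔ (i ≤ t ∨ i = t + 1) by omega]
      <;> omega

theorem pvPrefA (arr : List Int) :
    (PySem.List.pyRange 1 ((arr.length : Int) + 1) 1).foldl
      (fun ps i =>
        PySem.List.pySetD ps i
          (PySem.List.pyGetD ps (i - 1) 0 + PySem.List.pyGetD arr (i - 1) 0))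
      (List.replicate (((arr.length : Int)) + 1).toNat 0)
    = pvVec (arr.length + 1) (pvS arr) := by
  have h0 : (((arr.length : Int)) + 1).toNat = arr.length + 1 := by omega
  rw [h0, ← pvVec_const]
  rw [pvPrefA_aux arr arr.length (le_refl _)]
  apply pvVec_congr
  intro i hi
  simp [show i ≤ arr.length by omega]

-- ===== B's prefix loop =====
def pvSums (a : Int) : List Int → List Int
  | [] => []
  | x :: xs => (a + x) :: pvSums (a + x) xs

theorem pvPrefB_aux (xs : List Int) (ys : List Int) (a : Int) :
    xs.foldl (fun ps x => ps ++ [PySem.List.pyGetD ps (-1) 0 + x]) (ys ++ [a])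
    = ys ++ a :: pvSums a xs := by
  induction xs generalizing ys a with
  | nil => simp [pvSums]
  | cons x xs ih =>
    simp only [List.foldl_cons]
    rw [PySem.List.pyGetD_neg_one_append_singleton]
    have : (ys ++ [a]) ++ [a + x] = (ys ++ [a]) ++ [a + x] := rfl
    rw [show (ys ++ [a]) ++ [a + x] = (ys ++ [a]) ++ [a + x] from rfl]
    have := ih (ys ++ [a]) (a + x)
    rw [List.append_assoc] at this ⊢
    simpa [pvSums] using this

theorem pvSums_eq (xs : List Int) (a : Int) :
    pvSums a xs = (List.range xs.length).map (fun i => a + pvS xs (i + 1)) := by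
  induction xs generalizing a with
  | nil => simp [pvSums]
  | cons x xs ih =>
    simp only [pvSums, List.length_cons, List.range_succ_eq_map, List.map_cons, List.map_map]
    congr 1
    · simp [pvS_cons, pvS_zero]
    · rw [ih (a + x)]
      apply List.map_congr_left
      intro i _
      simp [pvS_cons]
      ring

theorem pvPrefB (arr : List Int) :
    arr.foldl (fun ps x => ps ++ [PySem.List.pyGetD ps (-1) 0 + x]) [0]
    = pvVec (arr.length + 1) (pvS arr) := by
  have h := pvPrefB_aux arr [] 0
  simp only [List.nil_append] at h
  rw [h, pvSums_eq]
  simp only [pvVec, List.range_succ_eq_map, List.map_cons, List.map_map]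
  have hh : (fun i => 0 + pvS arr (i + 1)) = (pvS arr ∘ Nat.succ) := by
    funext i; simp
  rw [hh, pvS_zero]

-- ===== the shared optimum: first argmin layer by layer =====
def pvL (arr : List Int) : ℕ → ℕ → Int × ℕ
  | 0 => fun i => (max 0 (pvS arr i), 0)
  | (t + 1) => fun i =>
      (pvFM (fun k => max (pvL arr t k).1 (pvS arr i - pvS arr k))
        (List.range' (t + 1) (i - (t + 1)))).getD (0, 0)

def pvDPf (arr : List Int) (sp : ℕ) (i j : ℕ) : Option Int :=
  if j = 0 then (if i = 0 then some 0 else none)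
  else if j ≤ i ∧ j ≤ sp then some ((pvL arr (j - 1) i).1) else none

def pvPTf (arr : List Int) (sp : ℕ) (i j : ℕ) : Int :=
  if 1 ≤ j ∧ j ≤ i ∧ j ≤ sp then ((pvL arr (j - 1) i).2 : Int) else -1

def pvDcut (arr : List Int) (sp t i j : ℕ) : Option Int :=
  if i ≤ t then pvDPf arr sp i j else none
def pvPcut (arr : List Int) (sp t i j : ℕ) : Int :=
  if i ≤ t then pvPTf arr sp i j else -1

def pvUpd2 {α : Type} (F : ℕ → ℕ → α) (i j : ℕ) (v : α) : ℕ → ℕ → α :=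
  fun a b => if a = i ∧ b = j then v else F a b

-- table get/set
theorem pvTbl_get2 {α : Type} (rows cols : ℕ) (F : ℕ → ℕ → α) (i j : ℕ) (d : α)
    (hi : i < rows) (hj : j < cols) :
    pvGet2 (pvTbl rows cols F) (i : Int) (j : Int) d = F i j := by
  unfold pvGet2 pvTbl
  rw [pvVec_getD _ _ _ _ hi, pvVec_getD _ _ _ _ hj]

theorem pvTbl_get2_last {α : Type} (rows cols : ℕ) (F : ℕ → ℕ → α) (j : ℕ) (d : α)
    (hr : 0 < rows) (hj : j < cols) :
    pvGet2 (pvTbl rows cols F) (-1) (j : Int) d = F (rows - 1) j := by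
  unfold pvGet2 pvTbl
  rw [pvVec_getD_last _ _ _ hr, pvVec_getD _ _ _ _ hj]

theorem pvTbl_set2 {α : Type} (rows cols : ℕ) (F : ℕ → ℕ → α) (i j : ℕ) (v : α)
    (hi : i < rows) (hj : j < cols) :
    pvSet2 (pvTbl rows cols F) (i : Int) (j : Int) v = pvTbl rows cols (pvUpd2 F i j v) := by
  unfold pvSet2 pvTbl
  rw [pvVec_getD _ _ _ _ hi, pvVec_set _ _ _ _ hj, pvVec_set _ _ _ _ hi]
  apply pvVec_congr
  intro a _
  by_cases ha : a = i
  · subst ha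
    simp only [if_pos rfl]
    apply pvVec_congr
    intro b _
    by_cases hb : b = j <;> simp [pvUpd2, hb]
  · simp only [if_neg ha]
    apply pvVec_congr
    intro b _
    simp [pvUpd2, ha]

theorem pvUpd2_upd2 {α : Type} (F : ℕ → ℕ → α) (i j : ℕ) (v w : α) :
    pvUpd2 (pvUpd2 F i j v) i j w = pvUpd2 F i j w := by
  funext a b
  by_cases h : a = i ∧ b = j <;> simp [pvUpd2, h]

-- ===== A's inner k-loop =====
def pvStA (PS : List Int) (i j : Int)
    (st : List (List (Option Int)) × List (List Int)) (k : Int) :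
    List (List (Option Int)) × List (List Int) :=
  let current_sum := PySem.List.pyGetD PS i 0 - PySem.List.pyGetD PS k 0
  let max_sum := pvInfMax (pvGet2 st.1 k (j - 1) none) current_sum
  if pvInfGt (pvGet2 st.1 i j none) max_sum then
    (pvSet2 st.1 i j max_sum, pvSet2 st.2 i j k)
  else st

theorem pvA_kfold (arr : List Int) (sp : ℕ) (F : ℕ → ℕ → Option Int) (G : ℕ → ℕ → Int)
    (i j : ℕ) (hin : i ≤ arr.length) (hj1 : 1 ≤ j) (hjsp : j ≤ sp) :
    ∀ (ks : List ℕ), (∀ k ∈ ks, k < i) → ∀ (c : Option Int) (p : Int),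
    List.foldl (fun st k => pvStA (pvVec (arr.length + 1) (pvS arr)) (i : Int) (j : Int) st k)
      (pvTbl (arr.length + 1) (sp + 1) (pvUpd2 F i j c),
       pvTbl (arr.length + 1) (sp + 1) (pvUpd2 G i j p))
      (ks.map (Nat.cast : ℕ → Int))
    = (pvTbl (arr.length + 1) (sp + 1)
         (pvUpd2 F i j (pvScanA (fun k => pvInfMax (F k (j - 1)) (pvS arr i - pvS arr k)) ks (c, p)).1),
       pvTbl (arr.length + 1) (sp + 1)
         (pvUpd2 G i j (pvScanA (fun k => pvInfMax (F k (j - 1)) (pvS arr i - pvS arr k)) ks (c, p)).2)) := by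
  intro ks
  induction ks generalizing F G with
  | nil => intro _ c p; simp [pvScanA]
  | cons k ks ih =>
    intro hks c p
    have hk : k < i := hks k (by simp)
    have hcast : ((j : Int)) - 1 = ((j - 1 : ℕ) : Int) := by omega
    have hgetk : pvGet2 (pvTbl (arr.length + 1) (sp + 1) (pvUpd2 F i j c)) (k : Int) ((j : Int) - 1) none
        = F k (j - 1) := by
      rw [hcast, pvTbl_get2 _ _ _ _ _ _ (by omega) (by omega)]
      simp [pvUpd2, show ¬(k = i ∧ j - 1 = j) from by omega]
    have hgetij : pvGet2 (pvTbl (arr.length + 1) (sp + 1) (pvUpd2 F i j c)) (i : Int) (j : Int) none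
        = c := by
      rw [pvTbl_get2 _ _ _ _ _ _ (by omega) (by omega)]
      simp [pvUpd2]
    have hpsi : PySem.List.pyGetD (pvVec (arr.length + 1) (pvS arr)) (i : Int) 0 = pvS arr i :=
      pvVec_getD _ _ _ _ (by omega)
    have hpsk : PySem.List.pyGetD (pvVec (arr.length + 1) (pvS arr)) (k : Int) 0 = pvS arr k :=
      pvVec_getD _ _ _ _ (by omega)
    rw [List.map_cons, List.foldl_cons]
    by_cases hgt : pvInfGt c (pvInfMax (F k (j - 1)) (pvS arr i - pvS arr k)) = true
    · have hstep : pvStA (pvVec (arr.length + 1) (pvS arr)) (i : Int) (j : Int)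
          (pvTbl (arr.length + 1) (sp + 1) (pvUpd2 F i j c),
           pvTbl (arr.length + 1) (sp + 1) (pvUpd2 G i j p)) (k : Int)
          = (pvTbl (arr.length + 1) (sp + 1)
               (pvUpd2 F i j (pvInfMax (F k (j - 1)) (pvS arr i - pvS arr k))),
             pvTbl (arr.length + 1) (sp + 1) (pvUpd2 G i j (k : Int))) := by
        simp only [pvStA, hgetk, hgetij, hpsi, hpsk, hgt, if_true]
        rw [pvTbl_set2 _ _ _ _ _ _ (by omega) (by omega),
            pvTbl_set2 _ _ _ _ _ _ (by omega) (by omega), pvUpd2_upd2, pvUpd2_upd2]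
      simp only [hstep]
      rw [ih F G (fun x hx => hks x (by simp [hx]))
          (pvInfMax (F k (j - 1)) (pvS arr i - pvS arr k)) (k : Int)]
      have hsc : pvScanA (fun k => pvInfMax (F k (j - 1)) (pvS arr i - pvS arr k)) (k :: ks) (c, p)
          = pvScanA (fun k => pvInfMax (F k (j - 1)) (pvS arr i - pvS arr k)) ks
              (pvInfMax (F k (j - 1)) (pvS arr i - pvS arr k), (k : Int)) := by
        simp [pvScanA, hgt]
      rw [hsc]
    · have hstep : pvStA (pvVec (arr.length + 1) (pvS arr)) (i : Int) (j : Int)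
          (pvTbl (arr.length + 1) (sp + 1) (pvUpd2 F i j c),
           pvTbl (arr.length + 1) (sp + 1) (pvUpd2 G i j p)) (k : Int)
          = (pvTbl (arr.length + 1) (sp + 1) (pvUpd2 F i j c),
             pvTbl (arr.length + 1) (sp + 1) (pvUpd2 G i j p)) := by
        rw [Bool.not_eq_true] at hgt
        simp only [pvStA, hgetk, hgetij, hpsi, hpsk, hgt, Bool.false_eq_true, if_false]
      simp only [hstep]
      rw [ih F G (fun x hx => hks x (by simp [hx])) c p]
      have hsc : pvScanA (fun k => pvInfMax (F k (j - 1)) (pvS arr i - pvS arr k)) (k :: ks) (c, p)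
          = pvScanA (fun k => pvInfMax (F k (j - 1)) (pvS arr i - pvS arr k)) ks (c, p) := by
        rw [Bool.not_eq_true] at hgt
        simp [pvScanA, hgt]
      rw [hsc]

def pvStJ (PS : List Int) (i : Int)
    (st : List (List (Option Int)) × List (List Int)) (j : Int) :
    List (List (Option Int)) × List (List Int) :=
  (PySem.List.pyRange 0 i 1).foldl (fun st k => pvStA PS i j st k) st

def pvDrow (arr : List Int) (sp t u : ℕ) (a b : ℕ) : Option Int :=
  if a = t + 1 ∧ 1 ≤ b ∧ b ≤ u then pvDPf arr sp (t + 1) b else pvDcut arr sp t a b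
def pvProw (arr : List Int) (sp t u : ℕ) (a b : ℕ) : Int :=
  if a = t + 1 ∧ 1 ≤ b ∧ b ≤ u then pvPTf arr sp (t + 1) b else pvPcut arr sp t a b

theorem pvL_succ_eq (arr : List Int) (t i : ℕ) (hi : t + 2 ≤ i) :
    ∃ r, pvFM (fun k => max (pvL arr t k).1 (pvS arr i - pvS arr k))
          (List.range' (t + 1) (i - (t + 1))) = some r
      ∧ pvL arr (t + 1) i = r ∧ r.2 ∈ List.range' (t + 1) (i - (t + 1)) := by
  have hlen : i - (t + 1) = (i - t - 2) + 1 := by omega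
  rw [hlen, List.range'_succ]
  obtain ⟨r, hr, hmem, _⟩ :=
    pvFM_mem (fun k => max (pvL arr t k).1 (pvS arr i - pvS arr k)) (t + 1)
      (List.range' (t + 2) (i - t - 2))
  refine ⟨r, hr, ?_, ?_⟩
  · show (pvFM _ (List.range' (t + 1) (i - (t + 1)))).getD (0, 0) = r
    rw [hlen, List.range'_succ, hr]
    rfl
  · exact hmem

theorem pvL_mem (arr : List Int) (t i : ℕ) (hi : t + 2 ≤ i) :
    t + 1 ≤ (pvL arr (t + 1) i).2 ∧ (pvL arr (t + 1) i).2 < i := by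
  obtain ⟨r, _, hLr, hmem⟩ := pvL_succ_eq arr t i hi
  rw [hLr]
  have := List.mem_range'_1.mp hmem
  omega

theorem pvRangeSplit (a m : ℕ) (h : a ≤ m) :
    List.range' 0 m = List.range' 0 a ++ List.range' a (m - a) := by
  have h2 := @List.range'_append 0 a (m - a) 1
  simp only [Nat.one_mul, Nat.zero_add] at h2
  conv_lhs => rw [show m = a + (m - a) from by omega]
  exact h2.symm

theorem pvA_jstep (arr : List Int) (sp t u : ℕ) (ht : t < arr.length)
    (hu : u + 1 ≤ min sp (t + 1)) :
    pvStJ (pvVec (arr.length + 1) (pvS arr)) ((t + 1 : ℕ) : Int)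
      (pvTbl (arr.length + 1) (sp + 1) (pvDrow arr sp t u),
       pvTbl (arr.length + 1) (sp + 1) (pvProw arr sp t u)) ((u + 1 : ℕ) : Int)
    = (pvTbl (arr.length + 1) (sp + 1) (pvDrow arr sp t (u + 1)),
       pvTbl (arr.length + 1) (sp + 1) (pvProw arr sp t (u + 1))) := by
  have husp : u + 1 ≤ sp := by omega
  have hui : u + 1 ≤ t + 1 := by omega
  unfold pvStJ
  rw [show (0 : Int) = ((0 : ℕ) : Int) from rfl, pvRangeNat 0 (t + 1)]
  have hD0 : pvDrow arr sp t u = pvUpd2 (pvDrow arr sp t u) (t + 1) (u + 1) none := by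
    funext a b
    by_cases h : a = t + 1 ∧ b = u + 1
    · simp [pvUpd2, h, pvDrow, pvDcut, show ¬(1 ≤ u + 1 ∧ u + 1 ≤ u) from by omega,
        show ¬(t + 1 ≤ t) from by omega]
    · simp [pvUpd2, h]
  have hP0 : pvProw arr sp t u = pvUpd2 (pvProw arr sp t u) (t + 1) (u + 1) (-1) := by
    funext a b
    by_cases h : a = t + 1 ∧ b = u + 1
    · simp [pvUpd2, h, pvProw, pvPcut, show ¬(1 ≤ u + 1 ∧ u + 1 ≤ u) from by omega,
        show ¬(t + 1 ≤ t) from by omega]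
    · simp [pvUpd2, h]
  rw [Nat.sub_zero]
  conv_lhs => rw [hD0, hP0]
  rw [pvA_kfold arr sp (pvDrow arr sp t u) (pvProw arr sp t u) (t + 1) (u + 1)
      (by omega) (by omega) husp (List.range' 0 (t + 1))
      (by intro k hk; have := List.mem_range'_1.mp hk; omega) none (-1)]
  -- evaluate the scan
  have hscan : pvScanA
      (fun k => pvInfMax (pvDrow arr sp t u k (u + 1 - 1)) (pvS arr (t + 1) - pvS arr k))
      (List.range' 0 (t + 1)) (none, -1)
      = (some ((pvL arr u (t + 1)).1 : Int), (((pvL arr u (t + 1)).2 : ℕ) : Int)) := by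
    have hcell : ∀ k, k < t + 1 →
        pvDrow arr sp t u k (u + 1 - 1) = pvDPf arr sp k u := by
      intro k hk
      simp only [pvDrow, pvDcut, Nat.add_sub_cancel]
      rw [if_neg (show ¬(k = t + 1 ∧ 1 ≤ u ∧ u ≤ u) from by omega),
        if_pos (show k ≤ t from by omega)]
    match u with
    | 0 =>
      have hsplit : List.range' 0 (t + 1) = [0] ++ List.range' 1 t := by
        have := pvRangeSplit 1 (t + 1) (by omega)
        simpa using this
      rw [hsplit, pvScanA_none_suffix]
      · unfold pvScanA
        simp only [List.foldl_cons, List.foldl_nil]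
        rw [hcell 0 (by omega)]
        simp [pvDPf, pvInfMax, pvInfGt, pvS_zero, pvL]
      · intro k hk
        have hk1 := List.mem_range'_1.mp hk
        rw [hcell k (by omega)]
        simp [pvDPf, pvInfMax, show ¬ k = 0 from by omega]
    | v + 1 =>
      have husp' : v + 1 ≤ sp := by omega
      have hui' : v + 2 ≤ t + 1 := by omega
      have hsplit : List.range' 0 (t + 1) = List.range' 0 (v + 1) ++ List.range' (v + 1) (t + 1 - (v + 1)) :=
        pvRangeSplit (v + 1) (t + 1) (by omega)
      rw [hsplit, pvScanA_none_prefix]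
      · obtain ⟨r, hr, hLr, _⟩ := pvL_succ_eq arr v (t + 1) (by omega)
        have hcorr := pvScanA_corr
          (fun k => pvInfMax (pvDrow arr sp t (v + 1) k (v + 1 + 1 - 1)) (pvS arr (t + 1) - pvS arr k))
          (fun k => max (pvL arr v k).1 (pvS arr (t + 1) - pvS arr k))
          (List.range' (v + 1) (t + 1 - (v + 1)))
          (by
            intro k hk
            simp only
            have hk1 := List.mem_range'_1.mp hk
            rw [hcell k (by omega)]
            simp [pvDPf, pvInfMax, show ¬ (v + 1) = 0 from by omega,
              show v + 1 ≤ k ∧ v + 1 ≤ sp from ⟨by omega, husp'⟩])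
          none (-1)
        simp only at hcorr
        rw [hcorr]
        obtain ⟨r1, r2⟩ := r
        rw [show pvScan (fun k => max (pvL arr v k).1 (pvS arr (t + 1) - pvS arr k))
              (List.range' (v + 1) (t + 1 - (v + 1))) none = some (r1, r2) from hr]
        rw [hLr]
      · intro k hk
        have hk1 := List.mem_range'_1.mp hk
        rw [hcell k (by omega)]
        have hnone : pvDPf arr sp k (v + 1) = none := by
          simp only [pvDPf]
          rw [if_neg (by omega), if_neg (by omega)]
        rw [hnone]
        rfl
  rw [hscan]
  congr 1
  · congr 1
    funext a b
    by_cases h : a = t + 1 ∧ b = u + 1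
    · obtain ⟨ha, hb⟩ := h
      subst ha; subst hb
      simp [pvUpd2, pvDrow, pvDPf, show 1 ≤ u + 1 ∧ u + 1 ≤ u + 1 from by omega,
        show ¬ u + 1 = 0 from by omega, show u + 1 ≤ t + 1 ∧ u + 1 ≤ sp from ⟨hui, husp⟩]
    · have hsame : pvDrow arr sp t (u + 1) a b = pvDrow arr sp t u a b := by
        by_cases h2 : a = t + 1 ∧ 1 ≤ b ∧ b ≤ u
        · simp [pvDrow, h2, show a = t + 1 ∧ 1 ≤ b ∧ b ≤ u + 1 from ⟨h2.1, h2.2.1, by omega⟩]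
        · have h3 : ¬(a = t + 1 ∧ 1 ≤ b ∧ b ≤ u + 1) := by
            rintro ⟨x1, x2, x3⟩
            rcases Nat.lt_or_ge b (u + 1) with hlt | hge
            · exact h2 ⟨x1, x2, by omega⟩
            · exact h ⟨x1, by omega⟩
          simp [pvDrow, h2, h3]
      rw [hsame]
      simp [pvUpd2, h]
  · congr 1
    funext a b
    by_cases h : a = t + 1 ∧ b = u + 1
    · obtain ⟨ha, hb⟩ := h
      subst ha; subst hb
      simp [pvUpd2, pvProw, pvPTf, show 1 ≤ u + 1 ∧ u + 1 ≤ u + 1 from by omega,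
        show 1 ≤ u + 1 ∧ u + 1 ≤ t + 1 ∧ u + 1 ≤ sp from ⟨by omega, hui, husp⟩]
    · have hsame : pvProw arr sp t (u + 1) a b = pvProw arr sp t u a b := by
        by_cases h2 : a = t + 1 ∧ 1 ≤ b ∧ b ≤ u
        · simp [pvProw, h2, show a = t + 1 ∧ 1 ≤ b ∧ b ≤ u + 1 from ⟨h2.1, h2.2.1, by omega⟩]
        · have h3 : ¬(a = t + 1 ∧ 1 ≤ b ∧ b ≤ u + 1) := by
            rintro ⟨x1, x2, x3⟩
            rcases Nat.lt_or_ge b (u+1) with hlt | hge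
            · exact h2 ⟨x1, x2, by omega⟩
            · exact h ⟨x1, by omega⟩
          simp [pvProw, h2, h3]
      rw [hsame]
      simp [pvUpd2, h]

def pvStI (PS : List Int) (snn : Int)
    (st : List (List (Option Int)) × List (List Int)) (i : Int) :
    List (List (Option Int)) × List (List Int) :=
  (PySem.List.pyRange 1 (min snn (i + 1)) 1).foldl (fun st j => pvStJ PS i st j) st

theorem pvDrow_zero (arr : List Int) (sp t : ℕ) :
    pvDrow arr sp t 0 = pvDcut arr sp t := by
  funext a b
  simp only [pvDrow, pvDcut, pvDPf, pvPTf]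
  split_ifs <;> (try simp only [true_and] at *) <;> first | rfl | omega

theorem pvProw_zero (arr : List Int) (sp t : ℕ) :
    pvProw arr sp t 0 = pvPcut arr sp t := by
  funext a b
  simp only [pvProw, pvPcut, pvPTf]
  split_ifs <;> (try simp only [true_and] at *) <;> first | rfl | omega

theorem pvDrow_last (arr : List Int) (sp t : ℕ) :
    pvDrow arr sp t (min sp (t + 1)) = pvDcut arr sp (t + 1) := by
  funext a b
  by_cases ha : a = t + 1
  · subst ha
    rcases Nat.le_total sp (t + 1) with hc | hc
    · rw [show min sp (t + 1) = sp from Nat.min_eq_left hc]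
      simp only [pvDrow, pvDcut, pvDPf, pvPTf]
      split_ifs <;> (try simp only [true_and] at *) <;> first | rfl | omega
    · rw [show min sp (t + 1) = t + 1 from Nat.min_eq_right hc]
      simp only [pvDrow, pvDcut, pvDPf, pvPTf]
      split_ifs <;> (try simp only [true_and] at *) <;> first | rfl | omega
  · have h1 : ¬(a = t + 1 ∧ 1 ≤ b ∧ b ≤ min sp (t + 1)) := fun hx => ha hx.1
    simp only [pvDrow, if_neg h1, pvDcut]
    split_ifs <;> (try simp only [true_and] at *) <;> first | rfl | omega

theorem pvProw_last (arr : List Int) (sp t : ℕ) :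
    pvProw arr sp t (min sp (t + 1)) = pvPcut arr sp (t + 1) := by
  funext a b
  by_cases ha : a = t + 1
  · subst ha
    rcases Nat.le_total sp (t + 1) with hc | hc
    · rw [show min sp (t + 1) = sp from Nat.min_eq_left hc]
      simp only [pvProw, pvPcut, pvDPf, pvPTf]
      split_ifs <;> (try simp only [true_and] at *) <;> first | rfl | omega
    · rw [show min sp (t + 1) = t + 1 from Nat.min_eq_right hc]
      simp only [pvProw, pvPcut, pvDPf, pvPTf]
      split_ifs <;> (try simp only [true_and] at *) <;> first | rfl | omega
  · have h1 : ¬(a = t + 1 ∧ 1 ≤ b ∧ b ≤ min sp (t + 1)) := fun hx => ha hx.1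
    simp only [pvProw, if_neg h1, pvPcut]
    split_ifs <;> (try simp only [true_and] at *) <;> first | rfl | omega
theorem pvA_row_aux (arr : List Int) (sp t : ℕ) (ht : t < arr.length) :
    ∀ u, u ≤ min sp (t + 1) →
    ((List.range' 1 u).map (Nat.cast : ℕ → Int)).foldl
      (fun st j => pvStJ (pvVec (arr.length + 1) (pvS arr)) ((t + 1 : ℕ) : Int) st j)
      (pvTbl (arr.length + 1) (sp + 1) (pvDcut arr sp t),
       pvTbl (arr.length + 1) (sp + 1) (pvPcut arr sp t))
    = (pvTbl (arr.length + 1) (sp + 1) (pvDrow arr sp t u),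
       pvTbl (arr.length + 1) (sp + 1) (pvProw arr sp t u)) := by
  intro u
  induction u with
  | zero => intro _; simp [pvDrow_zero, pvProw_zero]
  | succ u ih =>
    intro hu
    rw [List.range'_concat, List.map_append, List.foldl_append, ih (by omega)]
    simp only [List.map_cons, List.map_nil, List.foldl_cons, List.foldl_nil]
    rw [show ((1 + 1 * u : ℕ) : Int) = ((u + 1 : ℕ) : Int) by push_cast; ring]
    exact pvA_jstep arr sp t u ht hu

theorem pvRangeNat1 (b : ℕ) :
    PySem.List.pyRange 1 ((b : ℕ) : Int) 1 = (List.range' 1 (b - 1)).map (Nat.cast : ℕ → Int) := by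
  have h := pvRangeNat 1 b
  simpa using h

theorem pvA_row (arr : List Int) (sp t : ℕ) (ht : t < arr.length) :
    pvStI (pvVec (arr.length + 1) (pvS arr)) ((sp : Int) + 1)
      (pvTbl (arr.length + 1) (sp + 1) (pvDcut arr sp t),
       pvTbl (arr.length + 1) (sp + 1) (pvPcut arr sp t)) ((t + 1 : ℕ) : Int)
    = (pvTbl (arr.length + 1) (sp + 1) (pvDcut arr sp (t + 1)),
       pvTbl (arr.length + 1) (sp + 1) (pvPcut arr sp (t + 1))) := by
  unfold pvStI
  have hmin : min ((sp : Int) + 1) (((t + 1 : ℕ) : Int) + 1) = ((min sp (t + 1) + 1 : ℕ) : Int) := by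
    push_cast
    omega
  rw [hmin, pvRangeNat1 (min sp (t + 1) + 1)]
  rw [Nat.add_sub_cancel]
  rw [pvA_row_aux arr sp t ht (min sp (t + 1)) (le_refl _)]
  rw [pvDrow_last, pvProw_last]

theorem pvA_fill (arr : List Int) (sp : ℕ) :
    (PySem.List.pyRange 1 ((arr.length : Int) + 1) 1).foldl
      (fun st i => pvStI (pvVec (arr.length + 1) (pvS arr)) ((sp : Int) + 1) st i)
      (pvTbl (arr.length + 1) (sp + 1) (pvDcut arr sp 0),
       pvTbl (arr.length + 1) (sp + 1) (pvPcut arr sp 0))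
    = (pvTbl (arr.length + 1) (sp + 1) (pvDcut arr sp arr.length),
       pvTbl (arr.length + 1) (sp + 1) (pvPcut arr sp arr.length)) := by
  have hcast : (arr.length : Int) + 1 = ((arr.length + 1 : ℕ) : Int) := by push_cast; ring
  rw [hcast, pvRangeNat1 (arr.length + 1)]
  rw [Nat.add_sub_cancel]
  suffices h : ∀ t, t ≤ arr.length →
      ((List.range' 1 t).map (Nat.cast : ℕ → Int)).foldl
        (fun st i => pvStI (pvVec (arr.length + 1) (pvS arr)) ((sp : Int) + 1) st i)
        (pvTbl (arr.length + 1) (sp + 1) (pvDcut arr sp 0),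
         pvTbl (arr.length + 1) (sp + 1) (pvPcut arr sp 0))
      = (pvTbl (arr.length + 1) (sp + 1) (pvDcut arr sp t),
         pvTbl (arr.length + 1) (sp + 1) (pvPcut arr sp t)) by
    exact h arr.length (le_refl _)
  intro t
  induction t with
  | zero => intro _; simp
  | succ t ih =>
    intro htl
    rw [List.range'_concat, List.map_append, List.foldl_append, ih (by omega)]
    simp only [List.map_cons, List.map_nil, List.foldl_cons, List.foldl_nil]
    rw [show ((1 + 1 * t : ℕ) : Int) = ((t + 1 : ℕ) : Int) by push_cast; ring]
    exact pvA_row arr sp t (by omega)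

-- cut chains (proof-side view of the chosen partition indices)
inductive PVChain where
  | nil : PVChain
  | node : Int → PVChain → PVChain
deriving DecidableEq, Repr

def pvChainToList : PVChain → List Int
  | PVChain.nil => []
  | PVChain.node k p => k :: pvChainToList p

def pvC (arr : List Int) : ℕ → ℕ → PVChain
  | 0 => fun _ => PVChain.nil
  | (t + 1) => fun i =>
      PVChain.node ((pvL arr (t + 1) i).2 : Int) (pvC arr t (pvL arr (t + 1) i).2)

theorem pvC_bounds (arr : List Int) :
    ∀ t i, t + 1 ≤ i →
      (∀ x ∈ pvChainToList (pvC arr t i), 1 ≤ x ∧ x < (i : Int)) ∧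
      (pvChainToList (pvC arr t i)).Pairwise (· > ·) := by
  intro t
  induction t with
  | zero => intro i _; simp [pvC, pvChainToList]
  | succ t ih =>
    intro i hi
    obtain ⟨hk1, hk2⟩ := pvL_mem arr t i (by omega)
    set k := (pvL arr (t + 1) i).2 with hk
    have hrec := ih k (by omega)
    simp only [pvC, pvChainToList, ← hk]
    constructor
    · intro x hx
      rcases List.mem_cons.mp hx with h | h
      · subst h
        constructor
        · exact_mod_cast Nat.one_le_iff_ne_zero.mpr (by omega)
        · exact_mod_cast hk2
      · have := hrec.1 x h
        refine ⟨this.1, lt_trans this.2 ?_⟩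
        exact_mod_cast hk2
    · refine List.Pairwise.cons ?_ hrec.2
      intro x hx
      exact (hrec.1 x hx).2

-- ===== A's backtracking =====
theorem pvBT_cell (arr : List Int) (sp i j : ℕ) (hi : i ≤ arr.length) (hj : j ≤ sp) :
    pvGet2 (pvTbl (arr.length + 1) (sp + 1) (pvPcut arr sp arr.length)) (i : Int) (j : Int) (-1)
    = pvPTf arr sp i j := by
  rw [pvTbl_get2 _ _ _ _ _ _ (by omega) (by omega)]
  simp [pvPcut, hi]

theorem pvBT_cell_neg (arr : List Int) (sp j : ℕ) (hj : j ≤ sp) :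
    pvGet2 (pvTbl (arr.length + 1) (sp + 1) (pvPcut arr sp arr.length)) (-1) (j : Int) (-1)
    = pvPTf arr sp arr.length j := by
  rw [pvTbl_get2_last _ _ _ _ _ (by omega) (by omega)]
  simp [pvPcut]

theorem pvBT_run (arr : List Int) (sp : ℕ) :
    ∀ t, ∀ i, ∀ acc : List Int, 1 ≤ t → t ≤ i → i ≤ arr.length → t ≤ sp →
    ((PySem.List.pyRange (t : Int) 0 (-1)).foldl
      (fun (bs : Int × List Int) j =>
        let i2 := pvGet2 (pvTbl (arr.length + 1) (sp + 1) (pvPcut arr sp arr.length)) bs.1 j (-1)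
        (i2, if i2 > 0 then bs.2 ++ [i2] else bs.2))
      ((i : Int), acc)).2
    = acc ++ pvChainToList (pvC arr (t - 1) i) := by
  intro t
  induction t with
  | zero => intro i acc h1 _ _ _; omega
  | succ u ih =>
    intro i acc _ hti hin hsp
    rw [PySem.List.pyRange_neg_one_cons (by omega)]
    rw [List.foldl_cons]
    have hstep : pvGet2 (pvTbl (arr.length + 1) (sp + 1) (pvPcut arr sp arr.length))
        ((i : Int)) ((u + 1 : ℕ) : Int) (-1) = ((pvL arr u i).2 : Int) := by
      rw [pvBT_cell arr sp i (u + 1) hin hsp]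
      simp [pvPTf, show 1 ≤ u + 1 ∧ u + 1 ≤ i ∧ u + 1 ≤ sp from ⟨by omega, hti, hsp⟩]
    simp only [hstep]
    match u with
    | 0 =>
      have hz : ((pvL arr 0 i).2 : Int) = 0 := by simp [pvL]
      rw [hz]
      rw [show ((1 : ℕ) : Int) - 1 = 0 by omega, PySem.List.pyRange_neg_one_eq_nil (by omega)]
      simp [pvC, pvChainToList]
    | v + 1 =>
      obtain ⟨hk1, hk2⟩ := pvL_mem arr v i (by omega)
      set k := (pvL arr (v + 1) i).2 with hk
      have hpos : ((k : ℕ) : Int) > 0 := by exact_mod_cast Nat.lt_of_lt_of_le (by omega) hk1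
      rw [if_pos hpos]
      rw [show (((v + 1 + 1 : ℕ) : Int)) - 1 = ((v + 1 : ℕ) : Int) by push_cast; ring]
      have hih := ih k (acc ++ [(k : Int)]) (by omega) (by omega) (by omega) (by omega)
      simp only [Nat.add_sub_cancel] at hih ⊢
      rw [hih]
      simp only [pvC, pvChainToList, ← hk]
      rw [List.append_assoc]
      rfl

theorem pvRangeNegSplit (a b c : Int) (h1 : c ≤ b) (h2 : b ≤ a) :
    PySem.List.pyRange a c (-1) = PySem.List.pyRange a b (-1) ++ PySem.List.pyRange b c (-1) := by
  rw [PySem.List.pyRange_neg_one_eq_reverse, PySem.List.pyRange_neg_one_eq_reverse,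
    PySem.List.pyRange_neg_one_eq_reverse]
  rw [PySem.List.pyRange_one_append (c + 1) (b + 1) (a + 1) (by omega) (by omega)]
  rw [List.reverse_append]

theorem pvBT_stall (arr : List Int) (sp : ℕ) :
    ∀ js : List Int, (∀ j ∈ js, (arr.length : Int) < j ∧ j ≤ (sp : Int)) → ∀ acc : List Int,
    js.foldl
      (fun (bs : Int × List Int) j =>
        let i2 := pvGet2 (pvTbl (arr.length + 1) (sp + 1) (pvPcut arr sp arr.length)) bs.1 j (-1)
        (i2, if i2 > 0 then bs.2 ++ [i2] else bs.2))
      (-1, acc)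
    = (-1, acc) := by
  intro js
  induction js with
  | nil => intro _ acc; rfl
  | cons j js ih =>
    intro hmem acc
    obtain ⟨hj1, hj2⟩ := hmem j (by simp)
    rw [List.foldl_cons]
    have hcell : pvGet2 (pvTbl (arr.length + 1) (sp + 1) (pvPcut arr sp arr.length)) (-1) j (-1)
        = -1 := by
      rw [show j = ((j.toNat : ℕ) : Int) by omega]
      rw [pvBT_cell_neg arr sp j.toNat (by omega)]
      simp only [pvPTf]
      rw [if_neg (by omega)]
    simp only [hcell]
    rw [if_neg (by omega)]
    exact ih (fun x hx => hmem x (by simp [hx])) acc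

theorem pvBT_wrap (arr : List Int) (sp : ℕ) (hsp : arr.length < sp) :
    ((PySem.List.pyRange (sp : Int) 0 (-1)).foldl
      (fun (bs : Int × List Int) j =>
        let i2 := pvGet2 (pvTbl (arr.length + 1) (sp + 1) (pvPcut arr sp arr.length)) bs.1 j (-1)
        (i2, if i2 > 0 then bs.2 ++ [i2] else bs.2))
      ((arr.length : Int), [])).2
    = pvChainToList (pvC arr (arr.length - 1) arr.length) := by
  rw [pvRangeNegSplit (sp : Int) (arr.length : Int) 0 (by omega) (by omega)]
  rw [List.foldl_append]
  rw [PySem.List.pyRange_neg_one_cons (by omega), List.foldl_cons]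
  have hcell1 : pvGet2 (pvTbl (arr.length + 1) (sp + 1) (pvPcut arr sp arr.length))
      ((arr.length : Int)) ((sp : Int)) (-1) = -1 := by
    rw [pvBT_cell arr sp arr.length sp (le_refl _) (le_refl _)]
    simp only [pvPTf]
    rw [if_neg (by omega)]
  simp only [hcell1]
  rw [if_neg (by omega)]
  rw [pvBT_stall arr sp _ (by
    intro x hx
    have := PySem.List.mem_pyRange_neg_one.mp hx
    omega) []]
  rcases Nat.eq_zero_or_pos arr.length with hn0 | hn1
  · rw [show ((arr.length : ℕ) : Int) = 0 by omega, PySem.List.pyRange_neg_one_eq_nil (by omega)]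
    simp only [List.foldl_nil]
    rw [hn0]
    rfl
  · rw [PySem.List.pyRange_neg_one_cons (by omega), List.foldl_cons]
    have hcell2 : pvGet2 (pvTbl (arr.length + 1) (sp + 1) (pvPcut arr sp arr.length))
        (-1) ((arr.length : ℕ) : Int) (-1)
        = ((pvL arr (arr.length - 1) arr.length).2 : Int) := by
      rw [pvBT_cell_neg arr sp arr.length (by omega)]
      simp only [pvPTf]
      rw [if_pos ⟨by omega, le_refl _, by omega⟩]
    simp only [hcell2]
    by_cases h1 : arr.length = 1
    · have hz : ((pvL arr (arr.length - 1) arr.length).2 : Int) = 0 := by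
        rw [h1]
        simp [pvL]
      rw [hz, if_neg (by omega)]
      rw [show ((arr.length : ℕ) : Int) - 1 = 0 by omega,
        PySem.List.pyRange_neg_one_eq_nil (by omega)]
      simp only [List.foldl_nil]
      rw [h1]
      rfl
    · obtain ⟨v, hv⟩ : ∃ v, arr.length - 1 = v + 1 := ⟨arr.length - 2, by omega⟩
      have hb := pvL_mem arr v arr.length (by omega)
      rw [← hv] at hb
      obtain ⟨hk1, hk2⟩ := hb
      set k := (pvL arr (arr.length - 1) arr.length).2 with hk
      rw [if_pos (by exact_mod_cast Nat.lt_of_lt_of_le (by omega) hk1)]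
      rw [show ((arr.length : ℕ) : Int) - 1 = ((arr.length - 1 : ℕ) : Int) by omega]
      have hrun := pvBT_run arr sp (arr.length - 1) k [(k : Int)]
        (by omega) (by omega) (by omega) (by omega)
      rw [List.nil_append, hrun]
      rw [hv]
      simp only [pvC, pvChainToList, Nat.add_sub_cancel]
      rw [show (pvL arr (v + 1) arr.length).2 = k by rw [hk, hv]]
      rfl

theorem pvSorted_chain (arr : List Int) (t i : ℕ) (hi : t + 1 ≤ i) :
    PySem.List.sorted (pvChainToList (pvC arr t i)) (fun x => x) false
    = (pvChainToList (pvC arr t i)).reverse := by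
  apply PySem.List.sorted_eq_of_perm_of_pairwise_lt
  · exact List.reverse_perm _
  · rw [List.pairwise_reverse]
    exact (pvC_bounds arr t i hi).2

-- ===== B side: the memoized recursion computes pvL's value and pvCuts' cut list =====
def pvCuts (arr : List Int) : ℕ → ℕ → List Int
  | 0, _ => []
  | (t + 1), i => pvCuts arr t (pvL arr (t + 1) i).2 ++ [((pvL arr (t + 1) i).2 : Int)]

def pvR (arr : List Int) (t i : ℕ) : Int × List Int := ((pvL arr t i).1, pvCuts arr t i)

theorem pvCuts_eq_chain (arr : List Int) : ∀ t i, pvCuts arr t i = (pvChainToList (pvC arr t i)).reverse := by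
  intro t
  induction t with
  | zero => intro i; simp [pvCuts, pvC, pvChainToList]
  | succ t ih =>
    intro i
    simp only [pvCuts, pvC, pvChainToList, List.reverse_cons]
    rw [ih]

-- invariant: the memo only ever holds correct entries
def pvInv (arr : List Int) (memo : pvMemo) : Prop :=
  ∀ p r, PySem.Dict.get? memo p = some r →
    ∃ (i t : ℕ), p = ((i : Int), (t : Int) + 2) ∧ r = pvR arr (t + 1) i

-- payload view of the scan state: (value, argmin k) ↦ (value, cuts ending at k)
def pvPay (arr : List Int) (t : ℕ) (o : Option (Int × ℕ)) : Option (Int × List Int) :=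
  o.map (fun p => (p.1, pvCuts arr t p.2 ++ [(p.2 : Int)]))

theorem pvScan_cons (g : ℕ → Int) (k : ℕ) (ks : List ℕ) (b : Option (Int × ℕ)) :
    pvScan g (k :: ks) b = pvScan g ks (pvScan g [k] b) := by
  rcases b with _ | ⟨v, k0⟩ <;> simp [pvScan]

theorem pvStepB_eq (arr : List Int) (t i k : ℕ) (st0 : Option (Int × ℕ)) (m0 : pvMemo)
    (hki : k < i) (hin : i ≤ arr.length)
    (hr1 : (pvSolveB (pvVec (arr.length + 1) (pvS arr)) t (k : Int) m0).1 = pvR arr t k) :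
    pvStepB (pvVec (arr.length + 1) (pvS arr)) (pvSolveB (pvVec (arr.length + 1) (pvS arr)) t)
      ((i : ℕ) : Int) (pvPay arr t st0, m0) ((k : ℕ) : Int)
    = (pvPay arr t (pvScan (fun k => max (pvL arr t k).1 (pvS arr i - pvS arr k)) [k] st0),
       (pvSolveB (pvVec (arr.length + 1) (pvS arr)) t (k : Int) m0).2) := by
  simp only [pvStepB]
  rw [pvVec_getD _ _ _ _ (by omega), pvVec_getD _ _ _ _ (by omega), hr1]
  have hcand : (if (pvR arr t k).1 > pvS arr i - pvS arr k then (pvR arr t k).1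
        else pvS arr i - pvS arr k) = max (pvL arr t k).1 (pvS arr i - pvS arr k) := by
    show (if (pvL arr t k).1 > pvS arr i - pvS arr k then (pvL arr t k).1
        else pvS arr i - pvS arr k) = _
    rcases le_or_gt ((pvL arr t k).1) (pvS arr i - pvS arr k) with h | h
    · rw [if_neg (by omega), max_eq_right h]
    · rw [if_pos h, max_eq_left (le_of_lt h)]
  rcases st0 with _ | ⟨v, k0⟩
  · simp only [pvPay, Option.map_none, Option.map_some, pvScan, List.foldl_cons, List.foldl_nil]
    rw [hcand]
    rfl
  · simp only [pvPay, Option.map_some, pvScan, List.foldl_cons, List.foldl_nil]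
    rw [hcand]
    by_cases hlt : max (pvL arr t k).1 (pvS arr i - pvS arr k) < v
    · rw [if_pos hlt, if_pos hlt]
      rfl
    · rw [if_neg hlt, if_neg hlt]
      rfl

theorem pvSolveB_correct (arr : List Int) :
    ∀ t, ∀ i memo, pvInv arr memo → t + 1 ≤ i → i ≤ arr.length →
    (pvSolveB (pvVec (arr.length + 1) (pvS arr)) t (i : Int) memo).1 = pvR arr t i ∧
    pvInv arr (pvSolveB (pvVec (arr.length + 1) (pvS arr)) t (i : Int) memo).2 := by
  intro t
  induction t with
  | zero =>
    intro i memo hInv _ hin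
    simp only [pvSolveB]
    rw [pvVec_getD _ _ _ _ (by omega)]
    refine ⟨?_, hInv⟩
    simp only [pvR, pvCuts, pvL]
    rcases le_or_gt (pvS arr i) 0 with h | h
    · rw [if_neg (by omega), max_eq_left h]
    · rw [if_pos (by omega), max_eq_right (le_of_lt h)]
  | succ t ih =>
    intro i memo hInv hti hin
    rcases hget : PySem.Dict.get? memo (((i : ℕ) : Int), (t : Int) + 2) with _ | r
    · -- memo miss: run the k loop
      have hfold : ∀ (ks : List ℕ), (∀ k ∈ ks, t + 1 ≤ k ∧ k < i) →
          ∀ (st0 : Option (Int × ℕ)) (m0 : pvMemo), pvInv arr m0 →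
          ((ks.map (Nat.cast : ℕ → Int)).foldl
            (pvStepB (pvVec (arr.length + 1) (pvS arr)) (pvSolveB (pvVec (arr.length + 1) (pvS arr)) t)
              ((i : ℕ) : Int))
            (pvPay arr t st0, m0)).1
            = pvPay arr t (pvScan (fun k => max (pvL arr t k).1 (pvS arr i - pvS arr k)) ks st0) ∧
          pvInv arr ((ks.map (Nat.cast : ℕ → Int)).foldl
            (pvStepB (pvVec (arr.length + 1) (pvS arr)) (pvSolveB (pvVec (arr.length + 1) (pvS arr)) t)
              ((i : ℕ) : Int))
            (pvPay arr t st0, m0)).2 := by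
        intro ks
        induction ks with
        | nil => intro _ st0 m0 hm0; exact ⟨rfl, hm0⟩
        | cons k ks ihk =>
          intro hks st0 m0 hm0
          obtain ⟨hk1, hk2⟩ := hks k (by simp)
          obtain ⟨hr1, hr2⟩ := ih k m0 hm0 hk1 (by omega)
          simp only [List.map_cons, List.foldl_cons]
          rw [pvStepB_eq arr t i k st0 m0 hk2 hin hr1]
          rw [pvScan_cons]
          exact ihk (fun x hx => hks x (by simp [hx]))
            (pvScan (fun k => max (pvL arr t k).1 (pvS arr i - pvS arr k)) [k] st0)
            ((pvSolveB (pvVec (arr.length + 1) (pvS arr)) t (k : Int) m0).2) hr2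
      -- assemble the recursive case
      simp only [pvSolveB, hget]
      rw [show ((t : Int) + 1) = ((t + 1 : ℕ) : Int) by push_cast; ring]
      rw [pvRangeNat (t + 1) i]
      have hks : ∀ k ∈ List.range' (t + 1) (i - (t + 1)), t + 1 ≤ k ∧ k < i := by
        intro k hk
        have := List.mem_range'_1.mp hk
        omega
      have hmain := hfold (List.range' (t + 1) (i - (t + 1))) hks none memo hInv
      rw [show pvPay arr t none = none from rfl] at hmain
      obtain ⟨hv, hI⟩ := hmain
      obtain ⟨r, hr, hLr, _⟩ := pvL_succ_eq arr t i (by omega)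
      rw [show pvScan (fun k => max (pvL arr t k).1 (pvS arr i - pvS arr k))
            (List.range' (t + 1) (i - (t + 1))) none
          = pvFM (fun k => max (pvL arr t k).1 (pvS arr i - pvS arr k))
              (List.range' (t + 1) (i - (t + 1))) from rfl, hr] at hv
      have hbest : (((List.range' (t + 1) (i - (t + 1))).map (Nat.cast : ℕ → Int)).foldl
            (pvStepB (pvVec (arr.length + 1) (pvS arr)) (pvSolveB (pvVec (arr.length + 1) (pvS arr)) t)
              ((i : ℕ) : Int))
            (none, memo)).1.getD (0, [])
          = pvR arr (t + 1) i := by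
        rw [hv]
        simp only [pvPay, Option.map_some, Option.getD_some]
        rw [← hLr]
        simp only [pvR, pvCuts]
      refine ⟨hbest, ?_⟩
      intro p r' hp
      rw [PySem.Dict.get?_insert] at hp
      by_cases hpk : p = (((i : ℕ) : Int), (t : Int) + 2)
      · rw [if_pos hpk] at hp
        refine ⟨i, t, hpk, ?_⟩
        rw [← hbest, ← Option.some_inj, ← hp]
      · rw [if_neg hpk] at hp
        exact hI p r' hp
    · -- memo hit
      simp only [pvSolveB, hget]
      obtain ⟨i', t', hp, hr⟩ := hInv _ _ hget
      have hii : i' = i := by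
        have := congrArg Prod.fst hp
        simpa using this.symm
      have htt : t' = t := by
        have := congrArg Prod.snd hp
        simp only at this
        omega
      subst hii; subst htt
      exact ⟨hr, hInv⟩

theorem pvB_closed (arr : List Int) (sp : ℕ) :
    avg_split_list_alt arr (sp : Int)
    = if min sp arr.length = 0 then []
      else pvCuts arr (min sp arr.length - 1) arr.length := by
  have hrfl : avg_split_list_alt arr (sp : Int)
      = (if (if (sp : Int) < (arr.length : Int) then (sp : Int) else (arr.length : Int)) ≤ 0
         then ([] : List Int)
         else
           (pvSolveB (arr.foldl (fun ps x => ps ++ [PySem.List.pyGetD ps (-1) 0 + x]) [0])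
             ((if (sp : Int) < (arr.length : Int) then (sp : Int) else (arr.length : Int)).toNat - 1)
             ((arr.length : Int)) PySem.Dict.empty).1.2) := rfl
  rw [hrfl]
  have hm : (if (sp : Int) < (arr.length : Int) then (sp : Int) else (arr.length : Int))
      = ((min sp arr.length : ℕ) : Int) := by
    split_ifs with h <;> omega
  rw [hm, pvPrefB]
  by_cases hM : min sp arr.length = 0
  · rw [if_pos (by omega), if_pos hM]
  · rw [if_neg (by omega), if_neg hM]
    have hEmp : pvInv arr PySem.Dict.empty := by
      intro p r hp
      rw [PySem.Dict.get?_empty] at hp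
      exact absurd hp (by simp)
    have h := (pvSolveB_correct arr (min sp arr.length - 1) arr.length PySem.Dict.empty hEmp
      (by omega) (le_refl _)).1
    rw [show (((min sp arr.length : ℕ) : Int)).toNat - 1 = min sp arr.length - 1 by omega]
    rw [h]
    rfl

theorem pvTbl_const {α : Type} (rows cols : ℕ) (c : α) :
    List.replicate rows (List.replicate cols c) = pvTbl rows cols (fun _ _ => c) := by
  unfold pvTbl
  rw [← pvVec_const rows (List.replicate cols c)]
  apply pvVec_congr
  intro i _
  rw [← pvVec_const cols c]

theorem pvInit_dp (arr : List Int) (sp : ℕ) :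
    pvSet2 (List.replicate (arr.length + 1) (List.replicate (sp + 1) (none : Option Int)))
      (0 : Int) (0 : Int) (some 0)
    = pvTbl (arr.length + 1) (sp + 1) (pvDcut arr sp 0) := by
  rw [pvTbl_const]
  have h := pvTbl_set2 (arr.length + 1) (sp + 1) (fun _ _ => (none : Option Int)) 0 0 (some 0)
    (by omega) (by omega)
  simp only [Nat.cast_zero] at h
  rw [h]
  congr 1
  funext a b
  simp only [pvUpd2, pvDcut, pvDPf]
  split_ifs <;> first | rfl | omega

theorem pvInit_pt (arr : List Int) (sp : ℕ) :
    List.replicate (arr.length + 1) (List.replicate (sp + 1) (-1 : Int))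
    = pvTbl (arr.length + 1) (sp + 1) (pvPcut arr sp 0) := by
  rw [pvTbl_const]
  congr 1
  funext a b
  simp only [pvPcut, pvPTf]
  split_ifs <;> first | rfl | omega

theorem pvMain (arr : List Int) (sp : ℕ) :
    avg_split_list arr (sp : Int) = avg_split_list_alt arr (sp : Int) := by
  have hA : avg_split_list arr (sp : Int)
      = PySem.List.sorted
          (((PySem.List.pyRange (sp : Int) 0 (-1)).foldl
            (fun (bs : Int × List Int) j =>
              let i2 := pvGet2 (pvTbl (arr.length + 1) (sp + 1) (pvPcut arr sp arr.length)) bs.1 j (-1)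
              (i2, if i2 > 0 then bs.2 ++ [i2] else bs.2))
            ((arr.length : Int), [])).2) (fun x => x) false := by
    have hrfl : avg_split_list arr (sp : Int)
        = PySem.List.sorted
            (((PySem.List.pyRange (sp : Int) 0 (-1)).foldl
              (fun (bs : Int × List Int) j =>
                let i2 := pvGet2
                  (((PySem.List.pyRange 1 ((arr.length : Int) + 1) 1).foldl
                    (fun st i => pvStI
                      ((PySem.List.pyRange 1 ((arr.length : Int) + 1) 1).foldl
                        (fun ps i => PySem.List.pySetD ps i
                          (PySem.List.pyGetD ps (i - 1) 0 + PySem.List.pyGetD arr (i - 1) 0))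
                        (List.replicate ((arr.length : Int) + 1).toNat 0))
                      ((sp : Int) + 1) st i)
                    (pvSet2 (List.replicate ((arr.length : Int) + 1).toNat
                        (List.replicate ((sp : Int) + 1).toNat (none : Option Int))) 0 0 (some 0),
                     List.replicate ((arr.length : Int) + 1).toNat
                        (List.replicate ((sp : Int) + 1).toNat (-1 : Int)))).2)
                  bs.1 j (-1)
                (i2, if i2 > 0 then bs.2 ++ [i2] else bs.2))
              ((arr.length : Int), [])).2) (fun x => x) false := rfl
    rw [hrfl]
    rw [show ((arr.length : Int) + 1).toNat = arr.length + 1 by omega,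
        show ((sp : Int) + 1).toNat = sp + 1 by omega]
    have hpref := pvPrefA arr
    rw [show (((arr.length : Int)) + 1).toNat = arr.length + 1 by omega] at hpref
    rw [hpref]
    rw [show pvSet2 (List.replicate (arr.length + 1) (List.replicate (sp + 1) (none : Option Int)))
          0 0 (some 0) = pvTbl (arr.length + 1) (sp + 1) (pvDcut arr sp 0) from pvInit_dp arr sp]
    rw [pvInit_pt, pvA_fill]
  rw [hA, pvB_closed]
  by_cases hM : min sp arr.length = 0
  · rw [if_pos hM]
    rcases Nat.eq_zero_or_pos sp with hsp0 | hsp1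
    · subst hsp0
      rw [show ((0 : ℕ) : Int) = 0 from rfl, PySem.List.pyRange_neg_one_eq_nil (by omega)]
      rfl
    · have hn0 : arr.length = 0 := by omega
      rw [pvBT_wrap arr sp (by omega)]
      rw [hn0]
      rfl
  · rw [if_neg hM, pvCuts_eq_chain]
    rcases Nat.lt_or_ge arr.length sp with hgt | hle
    · rw [pvBT_wrap arr sp hgt]
      rw [pvSorted_chain arr (arr.length - 1) arr.length (by omega)]
      rw [Nat.min_eq_right (by omega)]
    · rw [pvBT_run arr sp sp arr.length [] (by omega) hle (le_refl _) (le_refl _)]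
      rw [List.nil_append]
      rw [pvSorted_chain arr (sp - 1) arr.length (by omega)]
      rw [Nat.min_eq_left hle]

-- ===== VERDICT (by name: the statement is the Claim_ definition above) =====
theorem avg_split_list_spec : Claim_equal_avg_split_list := by
  intro arr split_num hdom hpre
  unfold Spec_avg_split_list
  unfold Pre_avg_split_list at hpre
  obtain ⟨sp, rfl⟩ : ∃ sp : ℕ, split_num = (sp : Int) := ⟨split_num.toNat, by omega⟩
  exact pvMain arr sp
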